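-- pv_equiv track=rewrite | github.com/pdbro2k/pydanceweb | main/pydanceweb/pydance_tables.py | get_competitors_per_mark_sum
-- ===== SOURCE A (Python) =====
-- def get_competitors_per_mark_sum(marks_per_competitor):
--     competitors_per_mark_sum = {}
--     for competitor in marks_per_competitor:
--         mark_sum = sum(marks_per_competitor[competitor])
--         if mark_sum in competitors_per_mark_sum:
--             competitors_per_mark_sum[mark_sum].append(competitor)
--         else:
--             competitors_per_mark_sum[mark_sum] = [competitor]
--     return competitors_per_mark_sum
-- ===== SOURCE B (Python) =====
-- def get_competitors_per_mark_sum(marks_per_competitor):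
--     sums = {c: sum(ms) for c, ms in marks_per_competitor.items()}
--     seen = list(dict.fromkeys(sums.values()))
--     return {k: [c for c in sums if sums[c] == k] for k in seen}
-- ===== Notes on version B (the rewrite author's own statement) =====
-- stated objective: simpler
-- what changed: B replaces A's dict built by conditional insert-or-append with a dedup-then-filter grouping: pair each competitor with its mark sum, list the distinct sums in first-occurrence order, and emit each group by filtering the competitors with that sum (trades speed for brevity: O(n*k) over distinct sums k instead of A's single hashed pass).
import Mathlib
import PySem

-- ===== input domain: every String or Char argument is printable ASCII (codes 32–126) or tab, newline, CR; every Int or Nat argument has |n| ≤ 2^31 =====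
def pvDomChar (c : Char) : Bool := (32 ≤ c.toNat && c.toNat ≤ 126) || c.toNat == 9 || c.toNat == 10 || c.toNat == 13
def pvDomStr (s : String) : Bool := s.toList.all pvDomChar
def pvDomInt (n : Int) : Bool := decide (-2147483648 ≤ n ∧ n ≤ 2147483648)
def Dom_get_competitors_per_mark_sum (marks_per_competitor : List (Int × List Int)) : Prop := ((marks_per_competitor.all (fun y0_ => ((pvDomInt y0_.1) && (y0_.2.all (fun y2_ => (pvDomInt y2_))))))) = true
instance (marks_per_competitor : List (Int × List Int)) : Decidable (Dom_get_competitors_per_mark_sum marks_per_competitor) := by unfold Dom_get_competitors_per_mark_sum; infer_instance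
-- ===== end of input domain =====

-- B groups by first listing the distinct mark sums (ordered dedup) and then filtering the
-- competitors for each sum — no dict built by conditional append; objective: simpler/idiomatic.

-- ===== PORT A =====
-- A iterates the dict's (competitor, marks) entries, summing the marks and appending the
-- competitor into a dict keyed by the sum (insert on the first occurrence, append after).
def get_competitors_per_mark_sum (marks_per_competitor : List (Int × List Int)) : List (Int × List Int) :=
  (marks_per_competitor.foldl
    (fun d p =>
      let mark_sum := p.2.sum
      if d.contains mark_sum then d.modify mark_sum [] (fun v => v ++ [p.1])
      else d.insert mark_sum [p.1])
    PySem.Dict.empty).items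

-- ===== PORT B =====
-- B: pair each competitor with its mark sum, dedup the sums in first-occurrence order,
-- and emit for each distinct sum the competitors whose sum matches (a filter per key).
def get_competitors_per_mark_sum_alt (marks_per_competitor : List (Int × List Int)) : List (Int × List Int) :=
  let sums := marks_per_competitor.map (fun p => (p.1, p.2.sum))
  let seen := PySem.List.dedup (sums.map (·.2))
  seen.map (fun k => (k, (sums.filter (fun p => p.2 == k)).map (·.1)))

-- ===== PRECONDITION & SPEC =====
def Spec_get_competitors_per_mark_sum (marks_per_competitor : List (Int × List Int)) (out : List (Int × List Int)) : Prop := out = get_competitors_per_mark_sum_alt marks_per_competitor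
instance (marks_per_competitor : List (Int × List Int)) (out : List (Int × List Int)) : Decidable (Spec_get_competitors_per_mark_sum marks_per_competitor out) := by unfold Spec_get_competitors_per_mark_sum; infer_instance

-- ===== CLAIM (what is proved, stated in full; the proofs are below) =====
def Claim_equal_get_competitors_per_mark_sum : Prop := ∀ (marks_per_competitor : List (Int × List Int)), Dom_get_competitors_per_mark_sum marks_per_competitor → Spec_get_competitors_per_mark_sum marks_per_competitor (get_competitors_per_mark_sum marks_per_competitor)

-- ===== LEMMAS AND PROOFS =====

-- A's loop body is 'd[mark_sum] = d.get(mark_sum, []) + [competitor]' in both branches.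
theorem pv_step_eq (d : PySem.Dict Int (List Int)) (p : Int × List Int) :
    (let mark_sum := p.2.sum
     if d.contains mark_sum then d.modify mark_sum [] (fun v => v ++ [p.1])
     else d.insert mark_sum [p.1]) = d.modify p.2.sum [] (fun v => v ++ [p.1]) := by
  by_cases h : d.contains p.2.sum
  · simp [h]
  · simp only [h, Bool.false_eq_true, if_false]
    simp [PySem.Dict.modify, PySem.Dict.getD_of_not_contains, Bool.eq_false_iff.mpr h]

theorem pv_main (mpc : List (Int × List Int)) :
    get_competitors_per_mark_sum mpc = get_competitors_per_mark_sum_alt mpc := by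
  unfold get_competitors_per_mark_sum get_competitors_per_mark_sum_alt
  have hstep : (fun (d : PySem.Dict Int (List Int)) (p : Int × List Int) =>
      let mark_sum := p.2.sum
      if d.contains mark_sum then d.modify mark_sum [] (fun v => v ++ [p.1])
      else d.insert mark_sum [p.1]) =
      fun d p => d.modify p.2.sum [] (fun v => v ++ [p.1]) :=
    funext fun d => funext fun p => pv_step_eq d p
  rw [hstep]
  -- view the loop as a modify-append fold over the (sum, competitor) pairs
  have hfold : mpc.foldl (fun d p => d.modify p.2.sum [] (fun v => v ++ [p.1])) PySem.Dict.empty =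
      (mpc.map (fun p => (p.2.sum, p.1))).foldl
        (fun d q => d.modify q.1 [] (fun v => v ++ [q.2])) PySem.Dict.empty := by
    rw [List.foldl_map]
  rw [hfold]
  set l := mpc.map (fun p => (p.2.sum, p.1)) with hl
  set F := l.foldl (fun d q => d.modify q.1 [] (fun v => v ++ [q.2])) PySem.Dict.empty with hF
  have hkeys : F.keys = PySem.Set.ofList (l.map (·.1)) := by
    rw [hF, PySem.Dict.keys_foldl_modify_key l (·.1) [] (fun d q v => v ++ [q.2]) PySem.Dict.empty,
        PySem.Dict.keys_empty, PySem.Set.update_nil_left]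
  have hnd : F.keys.Nodup := by rw [hkeys]; exact PySem.Set.nodup_ofList _
  have hitems : F.items = F.keys.map (fun k => (k, F.getD k [])) :=
    PySem.Dict.items_eq_map_keys F hnd []
  rw [hitems, hkeys]
  have hgetD : ∀ k, F.getD k [] = (l.filter (fun q => q.1 == k)).map (·.2) := by
    intro k
    rw [hF, PySem.Dict.getD_foldl_modify_append l PySem.Dict.empty k, PySem.Dict.getD_empty]
    simp
  have hkeyseq : PySem.Set.ofList (l.map (·.1)) =
      PySem.List.dedup ((mpc.map (fun p => (p.1, p.2.sum))).map (·.2)) := by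
    simp [hl, List.map_map, Function.comp_def]
  rw [hkeyseq]
  refine List.map_congr_left ?_
  intro k _
  rw [hgetD k]
  simp [hl, List.filter_map, List.map_map, Function.comp_def]

-- ===== VERDICT (by name: the statement is the Claim_ definition above) =====
theorem get_competitors_per_mark_sum_spec : Claim_equal_get_competitors_per_mark_sum := by
  intro mpc _
  unfold Spec_get_competitors_per_mark_sum
  exact pv_main mpc
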